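-- pv_equiv track=rewrite | github.com/michaelwsd/Connect-4 | connectk.py | analyse_hard
-- ===== SOURCE A (Python) =====
-- def analyse_hard(board, player):
-- 	rows = len(board)
-- 	columns = len(board[0])
--
-- 	# Creates a dictionary of patterns for the cpu to check
-- 	weight = {
-- 		(player, player, player, player): 150,
-- 		(player, player, player, 0): 100,
-- 		(0, player, player, player): 100,
-- 		(player, player, 0, player): 50,
-- 		(player, 0, player, player): 50,
-- 		(player, player, 0, 0): 10,
-- 		(player, 0, player, 0): 10,
-- 		(0, player, player, 0): 10,
-- 		(player, 0, 0, player): 10,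
-- 		(0, 0, player, player): 10,
-- 		(0, 0, 0, player): 5,
-- 		(0, 0, player, 0): 5,
-- 		(0, player, 0, 0): 5,
-- 		(player, 0, 0, 0): 5
-- 	}
--
-- 	# Check for vertical pattern
-- 	for i in range(rows - 3):
-- 		for j in range(columns):
-- 			key = (board[i][j], board[i+1][j], board[i+2][j], board[i+3][j])
-- 			if key in weight:
-- 				# prioritise the highest weighing pattern
-- 				if weight[key] > 50:
-- 					return True
-- 				elif key.count(player) == 3:
-- 					if weight[key] > 10:
-- 						return True
-- 					elif key.count(player) == 2:
-- 						return True
-- 					elif key.count(player) == 1: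
-- 						return True
--
-- 	# Check for horizontal pattern
-- 	for i in range(rows):
-- 		for j in range(columns - 3):
-- 			key = (board[i][j], board[i][j+1], board[i][j+2], board[i][j+3])
-- 			if key in weight:
-- 				# prioritise the highest weighing pattern
-- 				if weight[key] > 50:
-- 					return True
-- 				elif key.count(player) == 3:
-- 					if weight[key] > 10:
-- 						return True
-- 					elif key.count(player) == 2:
-- 						return True
-- 					elif key.count(player) == 1:
-- 						return True
--
-- 	# Check for backward leaning pattern
-- 	for i in range(rows - 3):
-- 		for j in range(columns - 3):
-- 			key =(board[i][j], board[i+1][j+1], board[i+2][j+2], board[i+3][j+3])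
-- 			if key in weight:
-- 				# prioritise the highest weighing pattern
-- 				if weight[key] > 50:
-- 					return True
-- 				elif key.count(player) == 3:
-- 					if weight[key] > 10:
-- 						return True
-- 					elif key.count(player) == 2:
-- 						return True
-- 					elif key.count(player) == 1:
-- 						return True
--
-- 	# Check for forward leaning pattern
-- 	for i in range(rows - 3):
-- 		for j in range(3, columns):
-- 			key = (board[i][j], board[i+1][j-1], board[i+2][j-2], board[i+3][j-3])
-- 			if key in weight:
-- 				# prioritise the highest weighing pattern
-- 				if weight[key] > 50:
-- 					return True
-- 				elif key.count(player) == 3: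
-- 					if weight[key] > 10:
-- 						return True
-- 					elif key.count(player) == 2:
-- 						return True
-- 					elif key.count(player) == 1:
-- 						return True
--
-- 	return False
-- ===== SOURCE B (Python) =====
-- def analyse_hard(board, player):
--     rows = len(board)
--     columns = len(board[0])
--
--     # stage 1: extract every line of the board (4 directions) as a plain value list
--     lines = []
--     for i in range(rows):                                    # horizontal lines
--         lines.append([board[i][j] for j in range(columns)])
--     for j in range(columns):                                 # vertical lines
--         lines.append([board[i][j] for i in range(rows)])
--     for d in range(1 - rows, columns):                       # backward-leaning diagonals
--         lines.append([board[i][i + d] for i in range(max(0, -d), min(rows, columns - d))])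
--     for s in range(rows + columns - 1):                      # forward-leaning diagonals
--         lines.append([board[i][s - i] for i in range(max(0, s - columns + 1), min(rows, s + 1))])
--
--     # stage 2: prefix-count arithmetic over each line instead of inspecting windows
--     for line in lines:
--         mine = [0]   # prefix counts of player's cells
--         foes = [0]   # prefix counts of opponent cells
--         for c in line:
--             mine.append(mine[-1] + (1 if c == player else 0))
--             foes.append(foes[-1] + (1 if c != player and c != 0 else 0))
--         for t in range(len(line) - 3):
--             if foes[t + 4] == foes[t] and mine[t + 4] - mine[t] >= 3:
--                 return True
--     return False
-- ===== Notes on version B (the rewrite author's own statement) =====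
-- stated objective: simpler
-- what changed: B works in two staged passes: it first materialises every board line (rows, columns, both diagonal directions) as a value list, then checks each line by building prefix counts of player and opponent cells and testing windows with prefix-difference arithmetic, replacing A's four copy-pasted index loops with a 14-entry pattern-weight dict lookup per window.
-- outside the precondition, e.g. on analyse_hard([[0, 0, 0, 0]], 0): A returns False, B returns True
import Mathlib
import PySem

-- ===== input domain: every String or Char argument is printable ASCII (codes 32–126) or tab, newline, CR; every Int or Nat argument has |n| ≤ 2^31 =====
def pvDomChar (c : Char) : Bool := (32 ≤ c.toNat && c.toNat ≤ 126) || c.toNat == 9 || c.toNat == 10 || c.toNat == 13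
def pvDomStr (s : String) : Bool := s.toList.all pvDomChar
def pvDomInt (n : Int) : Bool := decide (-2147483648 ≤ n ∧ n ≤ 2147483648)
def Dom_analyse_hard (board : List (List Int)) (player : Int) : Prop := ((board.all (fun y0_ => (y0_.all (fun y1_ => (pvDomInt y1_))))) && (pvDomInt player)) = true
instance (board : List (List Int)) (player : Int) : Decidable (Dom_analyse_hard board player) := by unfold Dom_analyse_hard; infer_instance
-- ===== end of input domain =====

-- Program B re-decomposes A into two staged passes — extract every board line as a value
-- list, then test each line with prefix-count arithmetic — instead of A's four copy-pasted
-- window loops over a pattern-weight dict (objective: simpler).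


-- ===== PORT A =====
-- board[i][j]; the defaults are unreachable under Pre_ (indices are in range there)
def pvCell (board : List (List Int)) (i j : Int) : Int :=
  PySem.List.pyGetD (PySem.List.pyGetD board i []) j 0

-- the `weight` dict literal of A (insertion order; later duplicate keys overwrite)
def pvWeight (p : Int) : PySem.Dict (Int × Int × Int × Int) Int :=
  PySem.Dict.ofList
    [((p, p, p, p), 150), ((p, p, p, 0), 100), ((0, p, p, p), 100),
     ((p, p, 0, p), 50), ((p, 0, p, p), 50),
     ((p, p, 0, 0), 10), ((p, 0, p, 0), 10), ((0, p, p, 0), 10), ((p, 0, 0, p), 10), ((0, 0, p, p), 10),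
     ((0, 0, 0, p), 5), ((0, 0, p, 0), 5), ((0, p, 0, 0), 5), ((p, 0, 0, 0), 5)]

-- hand port of tuple.count on a 4-tuple (exact: sums one per equal component)
def pvTupCount (k : Int × Int × Int × Int) (v : Int) : Int :=
  (if k.1 = v then 1 else 0) + (if k.2.1 = v then 1 else 0) +
  (if k.2.2.1 = v then 1 else 0) + (if k.2.2.2 = v then 1 else 0)

-- the repeated body `if key in weight: …` of A (each branch in A's order; no-return falls through to false)
def pvCheckA (w : PySem.Dict (Int × Int × Int × Int) Int) (p : Int) (key : Int × Int × Int × Int) : Bool :=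
  if w.contains key then
    if w.getD key 0 > 50 then true
    else if pvTupCount key p = 3 then
      if w.getD key 0 > 10 then true
      else if pvTupCount key p = 2 then true
      else if pvTupCount key p = 1 then true
      else false
    else false
  else false

def analyse_hard (board : List (List Int)) (player : Int) : Bool :=
  let rows : Int := board.length
  let columns : Int := (PySem.List.pyGetD board 0 []).length
  let weight := pvWeight player
  -- vertical
  ((PySem.List.pyRange 0 (rows - 3) 1).any fun i =>
    (PySem.List.pyRange 0 columns 1).any fun j =>
      pvCheckA weight player
        (pvCell board i j, pvCell board (i+1) j, pvCell board (i+2) j, pvCell board (i+3) j)) ||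
  -- horizontal
  ((PySem.List.pyRange 0 rows 1).any fun i =>
    (PySem.List.pyRange 0 (columns - 3) 1).any fun j =>
      pvCheckA weight player
        (pvCell board i j, pvCell board i (j+1), pvCell board i (j+2), pvCell board i (j+3))) ||
  -- backward leaning
  ((PySem.List.pyRange 0 (rows - 3) 1).any fun i =>
    (PySem.List.pyRange 0 (columns - 3) 1).any fun j =>
      pvCheckA weight player
        (pvCell board i j, pvCell board (i+1) (j+1), pvCell board (i+2) (j+2), pvCell board (i+3) (j+3))) ||
  -- forward leaning
  ((PySem.List.pyRange 0 (rows - 3) 1).any fun i =>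
    (PySem.List.pyRange 3 columns 1).any fun j =>
      pvCheckA weight player
        (pvCell board i j, pvCell board (i+1) (j-1), pvCell board (i+2) (j-2), pvCell board (i+3) (j-3)))

-- ===== PORT B =====
-- stage 1 of B: every line of the board (4 directions) as a value list
def pvLines (board : List (List Int)) : List (List Int) :=
  let rows : Int := board.length
  let columns : Int := (PySem.List.pyGetD board 0 []).length
  ((PySem.List.pyRange 0 rows 1).map fun i =>
    (PySem.List.pyRange 0 columns 1).map fun j => pvCell board i j) ++
  ((PySem.List.pyRange 0 columns 1).map fun j =>
    (PySem.List.pyRange 0 rows 1).map fun i => pvCell board i j) ++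
  ((PySem.List.pyRange (1 - rows) columns 1).map fun d =>
    (PySem.List.pyRange (max 0 (-d)) (min rows (columns - d)) 1).map fun i => pvCell board i (i + d)) ++
  ((PySem.List.pyRange 0 (rows + columns - 1) 1).map fun s =>
    (PySem.List.pyRange (max 0 (s - columns + 1)) (min rows (s + 1)) 1).map fun i => pvCell board i (s - i))

-- the prefix-list loop of B's stage 2 (acc is mine[-1] / foes[-1])
def pvPref (f : Int → Bool) (acc : Int) : List Int → List Int
  | [] => [acc]
  | c :: rest => acc :: pvPref f (acc + if f c then 1 else 0) rest

-- stage 2 of B on one line: prefix counts, then prefix-difference window tests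
def pvLineCheck (p : Int) (line : List Int) : Bool :=
  let mine := pvPref (fun c => c == p) 0 line
  let foes := pvPref (fun c => !(c == p) && !(c == 0)) 0 line
  (PySem.List.pyRange 0 ((line.length : Int) - 3) 1).any fun t =>
    (PySem.List.pyGetD foes (t + 4) 0 == PySem.List.pyGetD foes t 0) &&
    decide (3 ≤ PySem.List.pyGetD mine (t + 4) 0 - PySem.List.pyGetD mine t 0)

def analyse_hard_alt (board : List (List Int)) (player : Int) : Bool :=
  (pvLines board).any (pvLineCheck player)

-- ===== PRECONDITION & SPEC =====
-- Pre_ excludes empty boards and ragged boards whose first row is not the shortest (A raises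
-- IndexError there), and player = 0, on which A's duplicate pattern keys collapse in the dict
-- so its value there is an accident of the dict literal.
def Pre_analyse_hard (board : List (List Int)) (player : Int) : Prop :=
  board ≠ [] ∧ player ≠ 0 ∧ ∀ row ∈ board, board.headI.length ≤ row.length
instance (board : List (List Int)) (player : Int) : Decidable (Pre_analyse_hard board player) := by
  unfold Pre_analyse_hard; infer_instance
def pvWitness_analyse_hard : List (List Int) × Int := ([[1, 1, 1, 0], [0, 2, 0, 0]], 1)

def Spec_analyse_hard (board : List (List Int)) (player : Int) (out : Bool) : Prop := out = analyse_hard_alt board player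
instance (board : List (List Int)) (player : Int) (out : Bool) : Decidable (Spec_analyse_hard board player out) := by unfold Spec_analyse_hard; infer_instance

-- ===== CLAIM (what is proved, stated in full; the proofs are below) =====
def Claim_equal_analyse_hard : Prop := ∀ (board : List (List Int)) (player : Int), Dom_analyse_hard board player → Pre_analyse_hard board player → Spec_analyse_hard board player (analyse_hard board player)

-- ===== LEMMAS AND PROOFS =====

-- the five window patterns that make A return True (player ≠ 0); A's trigger and B's
-- prefix-difference test are both shown equal to this disjunction
def pvPat (p a b c d : Int) : Bool :=
  ((a,b,c,d) == ((p,p,p,p) : Int × Int × Int × Int)) || (a,b,c,d) == (p,p,p,0) || (a,b,c,d) == (0,p,p,p) ||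
  (a,b,c,d) == (p,p,0,p) || (a,b,c,d) == (p,0,p,p)

-- BEq on 4-tuples of Ints, componentwise (definitional)
lemma prodBeq4 (a b c d e f g h : Int) :
    (((a,b,c,d) : Int × Int × Int × Int) == (e,f,g,h)) = (a == e && (b == f && (c == g && d == h))) := rfl

-- A's per-window trigger: exactly the five ≥3-player patterns of the weight dict fire (player ≠ 0)
set_option maxHeartbeats 2000000 in
lemma pvCheckA_pattern (p a b c d : Int) (hp : p ≠ 0) :
    pvCheckA (pvWeight p) p (a, b, c, d) = pvPat p a b c d := by
  have h0 : (0 : Int) ≠ p := Ne.symm hp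
  simp only [pvPat]
  by_cases h1 : ((a,b,c,d) : Int × Int × Int × Int) = (p,p,p,p)
  · rw [h1]; simp [pvCheckA, pvWeight, pvTupCount, PySem.Dict.ofList, PySem.Dict.update, List.foldl, PySem.Dict.contains_insert, PySem.Dict.contains_empty, PySem.Dict.getD_insert, PySem.Dict.getD_empty, prodBeq4, beq_eq_decide, Prod.mk.injEq, hp, h0]
  by_cases h2 : ((a,b,c,d) : Int × Int × Int × Int) = (p,p,p,0)
  · rw [h2]; simp [pvCheckA, pvWeight, pvTupCount, PySem.Dict.ofList, PySem.Dict.update, List.foldl, PySem.Dict.contains_insert, PySem.Dict.contains_empty, PySem.Dict.getD_insert, PySem.Dict.getD_empty, prodBeq4, beq_eq_decide, Prod.mk.injEq, hp, h0]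
  by_cases h3 : ((a,b,c,d) : Int × Int × Int × Int) = (0,p,p,p)
  · rw [h3]; simp [pvCheckA, pvWeight, pvTupCount, PySem.Dict.ofList, PySem.Dict.update, List.foldl, PySem.Dict.contains_insert, PySem.Dict.contains_empty, PySem.Dict.getD_insert, PySem.Dict.getD_empty, prodBeq4, beq_eq_decide, Prod.mk.injEq, hp, h0]
  by_cases h4 : ((a,b,c,d) : Int × Int × Int × Int) = (p,p,0,p)
  · rw [h4]; simp [pvCheckA, pvWeight, pvTupCount, PySem.Dict.ofList, PySem.Dict.update, List.foldl, PySem.Dict.contains_insert, PySem.Dict.contains_empty, PySem.Dict.getD_insert, PySem.Dict.getD_empty, prodBeq4, beq_eq_decide, Prod.mk.injEq, hp, h0]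
  by_cases h5 : ((a,b,c,d) : Int × Int × Int × Int) = (p,0,p,p)
  · rw [h5]; simp [pvCheckA, pvWeight, pvTupCount, PySem.Dict.ofList, PySem.Dict.update, List.foldl, PySem.Dict.contains_insert, PySem.Dict.contains_empty, PySem.Dict.getD_insert, PySem.Dict.getD_empty, prodBeq4, beq_eq_decide, Prod.mk.injEq, hp, h0]
  by_cases h6 : ((a,b,c,d) : Int × Int × Int × Int) = (p,p,0,0)
  · rw [h6]; simp [pvCheckA, pvWeight, pvTupCount, PySem.Dict.ofList, PySem.Dict.update, List.foldl, PySem.Dict.contains_insert, PySem.Dict.contains_empty, PySem.Dict.getD_insert, PySem.Dict.getD_empty, prodBeq4, beq_eq_decide, Prod.mk.injEq, hp, h0]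
  by_cases h7 : ((a,b,c,d) : Int × Int × Int × Int) = (p,0,p,0)
  · rw [h7]; simp [pvCheckA, pvWeight, pvTupCount, PySem.Dict.ofList, PySem.Dict.update, List.foldl, PySem.Dict.contains_insert, PySem.Dict.contains_empty, PySem.Dict.getD_insert, PySem.Dict.getD_empty, prodBeq4, beq_eq_decide, Prod.mk.injEq, hp, h0]
  by_cases h8 : ((a,b,c,d) : Int × Int × Int × Int) = (0,p,p,0)
  · rw [h8]; simp [pvCheckA, pvWeight, pvTupCount, PySem.Dict.ofList, PySem.Dict.update, List.foldl, PySem.Dict.contains_insert, PySem.Dict.contains_empty, PySem.Dict.getD_insert, PySem.Dict.getD_empty, prodBeq4, beq_eq_decide, Prod.mk.injEq, hp, h0]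
  by_cases h9 : ((a,b,c,d) : Int × Int × Int × Int) = (p,0,0,p)
  · rw [h9]; simp [pvCheckA, pvWeight, pvTupCount, PySem.Dict.ofList, PySem.Dict.update, List.foldl, PySem.Dict.contains_insert, PySem.Dict.contains_empty, PySem.Dict.getD_insert, PySem.Dict.getD_empty, prodBeq4, beq_eq_decide, Prod.mk.injEq, hp, h0]
  by_cases h10 : ((a,b,c,d) : Int × Int × Int × Int) = (0,0,p,p)
  · rw [h10]; simp [pvCheckA, pvWeight, pvTupCount, PySem.Dict.ofList, PySem.Dict.update, List.foldl, PySem.Dict.contains_insert, PySem.Dict.contains_empty, PySem.Dict.getD_insert, PySem.Dict.getD_empty, prodBeq4, beq_eq_decide, Prod.mk.injEq, hp, h0]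
  by_cases h11 : ((a,b,c,d) : Int × Int × Int × Int) = (0,0,0,p)
  · rw [h11]; simp [pvCheckA, pvWeight, pvTupCount, PySem.Dict.ofList, PySem.Dict.update, List.foldl, PySem.Dict.contains_insert, PySem.Dict.contains_empty, PySem.Dict.getD_insert, PySem.Dict.getD_empty, prodBeq4, beq_eq_decide, Prod.mk.injEq, hp, h0]
  by_cases h12 : ((a,b,c,d) : Int × Int × Int × Int) = (0,0,p,0)
  · rw [h12]; simp [pvCheckA, pvWeight, pvTupCount, PySem.Dict.ofList, PySem.Dict.update, List.foldl, PySem.Dict.contains_insert, PySem.Dict.contains_empty, PySem.Dict.getD_insert, PySem.Dict.getD_empty, prodBeq4, beq_eq_decide, Prod.mk.injEq, hp, h0]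
  by_cases h13 : ((a,b,c,d) : Int × Int × Int × Int) = (0,p,0,0)
  · rw [h13]; simp [pvCheckA, pvWeight, pvTupCount, PySem.Dict.ofList, PySem.Dict.update, List.foldl, PySem.Dict.contains_insert, PySem.Dict.contains_empty, PySem.Dict.getD_insert, PySem.Dict.getD_empty, prodBeq4, beq_eq_decide, Prod.mk.injEq, hp, h0]
  by_cases h14 : ((a,b,c,d) : Int × Int × Int × Int) = (p,0,0,0)
  · rw [h14]; simp [pvCheckA, pvWeight, pvTupCount, PySem.Dict.ofList, PySem.Dict.update, List.foldl, PySem.Dict.contains_insert, PySem.Dict.contains_empty, PySem.Dict.getD_insert, PySem.Dict.getD_empty, prodBeq4, beq_eq_decide, Prod.mk.injEq, hp, h0]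
  · simp [pvCheckA, pvWeight, pvTupCount, PySem.Dict.ofList, PySem.Dict.update, List.foldl, PySem.Dict.contains_insert, PySem.Dict.contains_empty, PySem.Dict.getD_insert, PySem.Dict.getD_empty, prodBeq4, beq_eq_decide, Prod.mk.injEq, hp, h0, h1, h2, h3, h4, h5, h6, h7, h8, h9, h10, h11, h12, h13, h14]

-- B's per-window counts (no opponent cell, ≥3 player cells) describe the same five patterns
set_option maxHeartbeats 1000000 in
lemma quad_pat (p a b c d : Int) (hp : p ≠ 0) :
    (List.countP (fun c => !(c == p) && !(c == 0)) [a,b,c,d] = 0 ∧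
     3 ≤ List.countP (fun c => c == p) [a,b,c,d]) ↔ pvPat p a b c d = true := by
  simp only [pvPat, prodBeq4, List.countP_cons, List.countP_nil, Bool.or_eq_true,
    Bool.and_eq_true, Bool.not_eq_eq_eq_not, Bool.not_true, beq_iff_eq, beq_eq_false_iff_ne]
  by_cases ha : a = p <;> by_cases hb : b = p <;> by_cases hc : c = p <;> by_cases hd : d = p <;>
    by_cases ha0 : a = 0 <;> by_cases hb0 : b = 0 <;> by_cases hc0 : c = 0 <;> by_cases hd0 : d = 0 <;>
    simp_all

-- B's prefix list holds the running count of f-cells of each prefix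
lemma pvPref_getD (f : Int → Bool) (a : Int) (L : List Int) (n : Nat) (h : n ≤ L.length) :
    (pvPref f a L).getD n 0 = a + ((L.take n).countP f : Int) := by
  induction L generalizing a n with
  | nil =>
    have : n = 0 := by simpa using h
    subst this; simp [pvPref]
  | cons c rest ih =>
    cases n with
    | zero => simp [pvPref]
    | succ m =>
      have hm : m ≤ rest.length := by simpa using h
      simp only [pvPref, List.getD_cons_succ, ih _ m hm, List.take_succ_cons, List.countP_cons]
      by_cases hf : f c <;> simp [hf] <;> ring

-- B's stage-2 test on one line, read back as a window condition
lemma pvLineCheck_iff (p : Int) (L : List Int) :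
    pvLineCheck p L = true ↔ ∃ n : Nat, n + 4 ≤ L.length ∧
      ((L.drop n).take 4).countP (fun c => !(c == p) && !(c == 0)) = 0 ∧
      3 ≤ ((L.drop n).take 4).countP (fun c => c == p) := by
  unfold pvLineCheck
  simp only [List.any_eq_true, PySem.List.mem_pyRange_one, Bool.and_eq_true, beq_iff_eq,
    decide_eq_true_eq]
  constructor
  · rintro ⟨t, ⟨ht0, htl⟩, hfoe, hmine⟩
    have htn : t = ((t.toNat : Nat) : Int) := by omega
    have h4 : ((t.toNat : Nat) : Int) + 4 = ((t.toNat + 4 : Nat) : Int) := by push_cast; ring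
    have hb : t.toNat + 4 ≤ L.length := by omega
    rw [htn] at hfoe hmine
    rw [h4] at hfoe hmine
    simp only [PySem.List.pyGetD_natCast] at hfoe hmine
    simp only [pvPref_getD _ _ L (t.toNat + 4) hb, pvPref_getD _ _ L t.toNat (by omega)]
      at hfoe hmine
    have hsplit : L.take (t.toNat + 4) = L.take t.toNat ++ (L.drop t.toNat).take 4 :=
      List.take_add
    rw [hsplit, List.countP_append] at hfoe hmine
    exact ⟨t.toNat, hb, by omega, by omega⟩
  · rintro ⟨n, hb, hfoe, hmine⟩
    refine ⟨(n : Int), ⟨by omega, by omega⟩, ?_, ?_⟩ <;>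
    · have h4 : (n : Int) + 4 = ((n + 4 : Nat) : Int) := by omega
      rw [h4]
      simp only [PySem.List.pyGetD_natCast]
      simp only [pvPref_getD _ _ L (n + 4) hb, pvPref_getD _ _ L n (by omega)]
      have hsplit : L.take (n + 4) = L.take n ++ (L.drop n).take 4 := List.take_add
      rw [hsplit, List.countP_append]
      omega

-- the 4-window of a map-over-range line, as explicit values
lemma window_map_range (f : Int → Int) (lo hi : Int) (n : Nat)
    (h : n + 4 ≤ ((PySem.List.pyRange lo hi 1).map f).length) :
    (((PySem.List.pyRange lo hi 1).map f).drop n).take 4 =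
      [f (lo + n), f (lo + n + 1), f (lo + n + 2), f (lo + n + 3)] := by
  have hlen : ((PySem.List.pyRange lo hi 1).map f).length = (hi - lo).toNat := by
    simp [PySem.List.length_pyRange_one]
  have hsplit : PySem.List.pyRange lo hi 1 =
      PySem.List.pyRange lo (lo + n) 1 ++ PySem.List.pyRange (lo + n) hi 1 :=
    PySem.List.pyRange_one_append lo (lo + n) hi (by omega) (by omega)
  have hlen1 : ((PySem.List.pyRange lo (lo + n) 1).map f).length = n := by
    simp [PySem.List.length_pyRange_one]
  have hc : PySem.List.pyRange (lo + n) hi 1 =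
      (lo + n) :: (lo + n + 1) :: (lo + n + 2) :: (lo + n + 3) :: PySem.List.pyRange (lo + n + 4) hi 1 := by
    rw [PySem.List.pyRange_one_cons (by omega), PySem.List.pyRange_one_cons (by omega),
        PySem.List.pyRange_one_cons (by omega), PySem.List.pyRange_one_cons (by omega)]
    refine congrArg (List.cons _) ?_
    refine congrArg₂ List.cons (by ring) ?_
    refine congrArg₂ List.cons (by ring) ?_
    refine congrArg₂ List.cons (by ring) ?_
    congr 1
    ring
  rw [hsplit, List.map_append, List.drop_append_of_le_length (by omega),
      List.drop_eq_nil_of_le (by omega), hc]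
  simp

-- B's line test on a map-over-range line ↔ a qualifying window at some start index
lemma check_map_range (p : Int) (hp : p ≠ 0) (lo hi : Int) (f : Int → Int) :
    pvLineCheck p ((PySem.List.pyRange lo hi 1).map f) = true ↔
      ∃ i : Int, lo ≤ i ∧ i + 3 < hi ∧ pvPat p (f i) (f (i+1)) (f (i+2)) (f (i+3)) = true := by
  rw [pvLineCheck_iff]
  have hlen : ((PySem.List.pyRange lo hi 1).map f).length = (hi - lo).toNat := by
    simp [PySem.List.length_pyRange_one]
  constructor
  · rintro ⟨n, hn, hfoe, hmine⟩
    rw [window_map_range f lo hi n hn] at hfoe hmine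
    refine ⟨lo + n, by omega, by omega, ?_⟩
    exact (quad_pat p _ _ _ _ hp).mp ⟨hfoe, hmine⟩
  · rintro ⟨i, h1, h2, hpat⟩
    have hn : (i - lo).toNat + 4 ≤ ((PySem.List.pyRange lo hi 1).map f).length := by omega
    refine ⟨(i - lo).toNat, hn, ?_⟩
    rw [window_map_range f lo hi _ hn]
    have e : lo + ((i - lo).toNat : Int) = i := by omega
    rw [e]
    exact (quad_pat p _ _ _ _ hp).mpr hpat

-- ===== VERDICT (by name: the statement is the Claim_ definition above) =====
theorem analyse_hard_spec : Claim_equal_analyse_hard := by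
  intro board player _ hpre
  obtain ⟨-, hp, -⟩ := hpre
  unfold Spec_analyse_hard
  rw [Bool.eq_iff_iff]
  simp only [analyse_hard, analyse_hard_alt, pvLines, List.any_append, List.any_map,
    Function.comp_def, Bool.or_eq_true, List.any_eq_true, PySem.List.mem_pyRange_one,
    pvCheckA_pattern _ _ _ _ _ hp, check_map_range player hp]
  constructor
  · rintro (((⟨i, hi, j, hj, hG⟩ | ⟨i, hi, j, hj, hG⟩) | ⟨i, hi, j, hj, hG⟩) | ⟨i, hi, j, hj, hG⟩)
    · -- A vertical → B column family
      exact Or.inl (Or.inl (Or.inr ⟨j, hj, i, by omega, by omega, hG⟩))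
    · -- A horizontal → B row family
      exact Or.inl (Or.inl (Or.inl ⟨i, hi, j, by omega, by omega, hG⟩))
    · -- A backward → B diagonal family, d = j - i
      refine Or.inl (Or.inr ⟨j - i, ⟨by omega, by omega⟩, i, by omega, by omega, ?_⟩)
      have e1 : i + (j - i) = j := by ring
      have e2 : i + 1 + (j - i) = j + 1 := by ring
      have e3 : i + 2 + (j - i) = j + 2 := by ring
      have e4 : i + 3 + (j - i) = j + 3 := by ring
      rw [e1, e2, e3, e4]; exact hG
    · -- A forward → B anti-diagonal family, s = i + j
      refine Or.inr ⟨i + j, ⟨by omega, by omega⟩, i, by omega, by omega, ?_⟩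
      have e1 : i + j - i = j := by ring
      have e2 : i + j - (i + 1) = j - 1 := by ring
      have e3 : i + j - (i + 2) = j - 2 := by ring
      have e4 : i + j - (i + 3) = j - 3 := by ring
      rw [e1, e2, e3, e4]; exact hG
  · rintro (((⟨i, hi, j, hj1, hj2, hG⟩ | ⟨j, hj, i, hi1, hi2, hG⟩) |
      ⟨d, hd, i, hi1, hi2, hG⟩) | ⟨s, hs, i, hi1, hi2, hG⟩)
    · -- B row → A horizontal
      exact Or.inl (Or.inl (Or.inr ⟨i, hi, j, ⟨hj1, by omega⟩, hG⟩))
    · -- B column → A vertical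
      exact Or.inl (Or.inl (Or.inl ⟨i, ⟨hi1, by omega⟩, j, hj, hG⟩))
    · -- B diagonal → A backward, j = i + d
      refine Or.inl (Or.inr ⟨i, ⟨by omega, by omega⟩, i + d, ⟨by omega, by omega⟩, ?_⟩)
      have e2 : i + d + 1 = i + 1 + d := by ring
      have e3 : i + d + 2 = i + 2 + d := by ring
      have e4 : i + d + 3 = i + 3 + d := by ring
      rw [e2, e3, e4]; exact hG
    · -- B anti-diagonal → A forward, j = s - i
      refine Or.inr ⟨i, ⟨by omega, by omega⟩, s - i, ⟨by omega, by omega⟩, ?_⟩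
      have e2 : s - i - 1 = s - (i + 1) := by ring
      have e3 : s - i - 2 = s - (i + 2) := by ring
      have e4 : s - i - 3 = s - (i + 3) := by ring
      rw [e2, e3, e4]; exact hG
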